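-- pv_equiv track=rewrite | github.com/Rpratik13/HackerRank | Tournament_Practice/almostSorted.py | almostSorted
-- ===== SOURCE A (Python) =====
-- def almostSorted(arr):
-- 	misplaced = []
-- 	sorted_arr = sorted(arr)
-- 	for i in range(len(arr) - 1):
-- 		if len(misplaced) == 0:
-- 			if arr[i] > arr[i + 1]:
-- 				misplaced.append(i)
-- 		elif len(misplaced) == 1:
-- 			if arr[i + 1] < arr[i]:
-- 				misplaced.append(i + 1)
-- 		if len(misplaced) == 1:
-- 			arr[misplaced[0]], arr[misplaced[0] + 1] = arr[misplaced[0] + 1], arr[misplaced[0]]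
-- 			if arr == sorted_arr:
-- 				return "yes \nswap {} {}".format(misplaced[0] + 1, misplaced[0] + 2)
-- 			else:
-- 				arr[misplaced[0]], arr[misplaced[0] + 1] = arr[misplaced[0] + 1], arr[misplaced[0]]
--
-- 		elif len(misplaced) == 2:
-- 			arr[misplaced[0]], arr[misplaced[1]] = arr[misplaced[1]], arr[misplaced[0]]
-- 			if arr == sorted_arr:
-- 				return "yes \nswap {} {}".format(misplaced[0] + 1, misplaced[1] + 1)
-- 			else:
-- 				arr[misplaced[0]], arr[misplaced[1]] = arr[misplaced[1]], arr[misplaced[0]]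
-- 			break
-- 	rev = []
-- 	for i in range(len(arr)):
-- 		if len(rev) == 2:
-- 			arr[rev[0]: rev[1] + 1] = arr[rev[0]: rev[1] + 1][::-1]
-- 			if arr == sorted_arr:
-- 				return 'yes \nreverse {} {}'.format(rev[0] + 1, rev[1] + 1)
-- 			break
-- 		if len(rev) == 0:
-- 			if arr[i] > arr[i + 1]:
-- 				rev.append(i)
-- 		elif len(rev) == 1:
-- 			if arr[i] < arr[i + 1]:
-- 				rev.append(i)
--
-- 	return "no"
-- ===== SOURCE B (Python) =====
-- def almostSorted(arr):
--     # One sort + three single scans; each candidate fix is tested once against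
--     # sorted(arr), instead of A's re-swap-and-compare inside the loops.
--     # Does not mutate arr (A restores arr except after a failed reverse attempt).
--     s = sorted(arr)
--     n = len(arr)
--     d = next((i for i in range(n - 1) if arr[i] > arr[i + 1]), None)
--     if d is None:
--         return "no"
--     t = list(arr)
--     t[d], t[d + 1] = t[d + 1], t[d]
--     if t == s:
--         return "yes \nswap {} {}".format(d + 1, d + 2)
--     e = next((i for i in range(d + 1, n - 1) if arr[i] > arr[i + 1]), None)
--     if e is not None:
--         t = list(arr)
--         t[d], t[e + 1] = t[e + 1], t[d]
--         if t == s: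
--             return "yes \nswap {} {}".format(d + 1, e + 2)
--     q = next((i for i in range(d + 1, n - 1) if arr[i] < arr[i + 1]), None)
--     if q is not None and arr[:d] + arr[d:q + 1][::-1] + arr[q + 1:] == s:
--         return "yes \nreverse {} {}".format(d + 1, q + 1)
--     return "no"
-- ===== Notes on version B (the rewrite author's own statement) =====
-- stated objective: alternative
-- what changed: B replaces A's two stateful loops (which re-swap the list in place and re-compare the whole list against sorted(arr) on every iteration) by three plain index scans (first descent, next descent, first ascent) and a single one-shot test of each candidate swap/reverse against sorted(arr), with no mutation of arr.
import Mathlib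
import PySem

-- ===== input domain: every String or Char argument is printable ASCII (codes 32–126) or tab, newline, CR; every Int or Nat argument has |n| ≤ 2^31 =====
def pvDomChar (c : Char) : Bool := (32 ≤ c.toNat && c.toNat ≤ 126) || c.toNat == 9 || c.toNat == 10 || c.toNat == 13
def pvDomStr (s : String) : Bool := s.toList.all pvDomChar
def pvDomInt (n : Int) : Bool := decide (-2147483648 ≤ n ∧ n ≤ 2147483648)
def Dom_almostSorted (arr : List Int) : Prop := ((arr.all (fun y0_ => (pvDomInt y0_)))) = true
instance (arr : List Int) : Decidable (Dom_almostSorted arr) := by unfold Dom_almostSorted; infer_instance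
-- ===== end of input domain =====

-- B answers with one sort plus three single index scans and a one-shot test of each
-- candidate swap/reverse, instead of A's in-place re-swap-and-recompare loops
-- (equivalence is about the return value; A may leave arr partially reversed, B never mutates arr).


-- ===== PORT A =====
-- arr[i] for an index known to be in range (Pre_ excludes the IndexError inputs)
def pyget (l : List Int) (i : Nat) : Int := l.getD i 0

-- Python's 'arr[i], arr[j] = arr[j], arr[i]' (exact for in-range i, j)
def pySwap (l : List Int) (i j : Nat) : List Int := (l.set i (l.getD j 0)).set j (l.getD i 0)

-- Python's 'arr[a:b+1] = arr[a:b+1][::-1]' (exact for 0 ≤ a ≤ b < len)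
def pyRevSeg (l : List Int) (a b : Nat) : List Int :=
  l.take a ++ ((l.take (b + 1)).drop a).reverse ++ l.drop (b + 1)

-- first for-loop of A: state = (mutated arr, misplaced); .error = early return, .ok = fall through
def aLoop1 (s : List Int) : List Nat → List Int → List Nat → Except String (List Int)
  | [], arr, _ => .ok arr
  | i :: rest, arr, mis =>
    let mis := if mis.length = 0 then
                 (if pyget arr i > pyget arr (i + 1) then mis ++ [i] else mis)
               else if mis.length = 1 then
                 (if pyget arr (i + 1) < pyget arr i then mis ++ [i + 1] else mis)
               else mis
    if mis.length = 1 then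
      let m0 := mis.headD 0
      let arr2 := pySwap arr m0 (m0 + 1)
      if arr2 = s then .error ("yes \nswap " ++ toString (m0 + 1) ++ " " ++ toString (m0 + 2))
      else aLoop1 s rest (pySwap arr2 m0 (m0 + 1)) mis
    else if mis.length = 2 then
      let m0 := mis.headD 0
      let m1 := mis.getD 1 0
      let arr2 := pySwap arr m0 m1
      if arr2 = s then .error ("yes \nswap " ++ toString (m0 + 1) ++ " " ++ toString (m1 + 1))
      else .ok (pySwap arr2 m0 m1)          -- break (arr restored)
    else aLoop1 s rest arr mis

-- second for-loop of A: state = (arr, rev); falls through to 'return "no"'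
def aLoop2 (s : List Int) : List Nat → List Int → List Nat → String
  | [], _, _ => "no"
  | i :: rest, arr, rev =>
    if rev.length = 2 then
      let r0 := rev.headD 0
      let r1 := rev.getD 1 0
      let arr2 := pyRevSeg arr r0 r1
      if arr2 = s then "yes \nreverse " ++ toString (r0 + 1) ++ " " ++ toString (r1 + 1)
      else "no"                              -- break, then 'return "no"'
    else
      let rev := if rev.length = 0 then
                   (if pyget arr i > pyget arr (i + 1) then rev ++ [i] else rev)
                 else if rev.length = 1 then
                   (if pyget arr i < pyget arr (i + 1) then rev ++ [i] else rev)
                 else rev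
      aLoop2 s rest arr rev

def almostSorted (arr : List Int) : String :=
  let sorted_arr := PySem.List.sorted arr (fun x => x) false
  match aLoop1 sorted_arr (List.range (arr.length - 1)) arr [] with
  | .error out => out
  | .ok arr2 => aLoop2 sorted_arr (List.range arr.length) arr2 []

-- ===== PORT B =====
-- index of the first i with l[i] > l[i+1]
def firstDesc : List Int → Option Nat
  | a :: b :: t => if a > b then some 0 else (firstDesc (b :: t)).map (· + 1)
  | _ => none

-- index of the first i with l[i] < l[i+1]
def firstAsc : List Int → Option Nat
  | a :: b :: t => if a < b then some 0 else (firstAsc (b :: t)).map (· + 1)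
  | _ => none

def almostSorted_alt (arr : List Int) : String :=
  let s := PySem.List.sorted arr (fun x => x) false
  match firstDesc arr with
  | none => "no"
  | some d =>
    if pySwap arr d (d + 1) = s then
      "yes \nswap " ++ toString (d + 1) ++ " " ++ toString (d + 2)
    else
      let tryE : Option String :=
        match firstDesc (arr.drop (d + 1)) with
        | some k =>
          if pySwap arr d (d + 2 + k) = s then
            some ("yes \nswap " ++ toString (d + 1) ++ " " ++ toString (d + 2 + k + 1))
          else none
        | none => none
      match tryE with
      | some out => out
      | none =>
        match firstAsc (arr.drop (d + 1)) with
        | some t =>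
          if pyRevSeg arr d (d + 1 + t) = s then
            "yes \nreverse " ++ toString (d + 1) ++ " " ++ toString (d + 1 + t + 1)
          else "no"
        | none => "no"

-- ===== PRECONDITION & SPEC =====
-- Pre_ excludes exactly the inputs on which A raises IndexError (its second loop
-- reads arr[len(arr)]): every nonempty arr with no strict descent, and every arr
-- whose first descent d yields no successful swap and no strict ascent after d
-- usable for the reverse attempt; A returns on every input inside Pre_.
def Pre_almostSorted (arr : List Int) : Prop :=
  arr = [] ∨
  ∃ d ∈ List.range (arr.length - 1),
    (pyget arr d > pyget arr (d + 1) ∧ ∀ i ∈ List.range d, ¬ (pyget arr i > pyget arr (i + 1))) ∧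
    (pySwap arr d (d + 1) = PySem.List.sorted arr (fun x => x) false ∨
     (∃ e ∈ List.range (arr.length - 1), d < e ∧ pyget arr e > pyget arr (e + 1) ∧
        (∀ i ∈ List.range e, d < i → ¬ (pyget arr i > pyget arr (i + 1))) ∧
        pySwap arr d (e + 1) = PySem.List.sorted arr (fun x => x) false) ∨
     (∃ q ∈ List.range (arr.length - 1), d < q ∧ pyget arr q < pyget arr (q + 1)))
instance (arr : List Int) : Decidable (Pre_almostSorted arr) := by
  unfold Pre_almostSorted; infer_instance

def pvWitness_almostSorted : List Int := [1, 3, 2]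

def Spec_almostSorted (arr : List Int) (out : String) : Prop := out = almostSorted_alt arr
instance (arr : List Int) (out : String) : Decidable (Spec_almostSorted arr out) := by
  unfold Spec_almostSorted; infer_instance

-- ===== CLAIM (what is proved, stated in full; the proofs are below) =====
def Claim_equal_almostSorted : Prop :=
  ∀ (arr : List Int), Dom_almostSorted arr → Pre_almostSorted arr →
    Spec_almostSorted arr (almostSorted arr)

-- ===== LEMMAS AND PROOFS =====

theorem pySwap_pySwap (l : List Int) (i j : Nat) (hi : i < l.length) (hj : j < l.length) :
    pySwap (pySwap l i j) i j = l := by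
  apply List.ext_getElem?
  intro k
  by_cases hk : k < l.length
  · simp only [pySwap, List.length_set, List.getD_eq_getElem?_getD,
      List.getElem?_eq_getElem, hi, hj, hk, Option.getD_some, List.getElem_set]
    split_ifs <;> simp_all
  · have hlen : (pySwap (pySwap l i j) i j).length = l.length := by simp [pySwap]
    rw [List.getElem?_eq_none (by rw [hlen]; omega), List.getElem?_eq_none (by omega)]

theorem pyget_drop (l : List Int) (m i : Nat) :
    pyget (l.drop m) i = pyget l (m + i) := by
  simp [pyget, List.getD_eq_getElem?_getD, List.getElem?_drop]

theorem firstDesc_some (l : List Int) (d : Nat) (h : firstDesc l = some d) :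
    d + 1 < l.length ∧ pyget l d > pyget l (d + 1) ∧
      ∀ i, i < d → ¬ (pyget l i > pyget l (i + 1)) := by
  induction l generalizing d with
  | nil => simp [firstDesc] at h
  | cons a tl ih =>
    cases tl with
    | nil => simp [firstDesc] at h
    | cons b t =>
      rw [firstDesc] at h
      by_cases hab : a > b
      · simp [hab] at h
        subst h
        refine ⟨by simp, ?_, by intro i hi; omega⟩
        simpa [pyget] using hab
      · simp [hab] at h
        obtain ⟨d', hd', rfl⟩ := h
        obtain ⟨h1, h2, h3⟩ := ih d' hd'
        refine ⟨by simpa using h1, by simpa [pyget] using h2, ?_⟩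
        intro i hi
        cases i with
        | zero => simpa [pyget] using hab
        | succ i' =>
          have := h3 i' (by omega)
          simpa [pyget] using this

theorem firstDesc_none (l : List Int) (h : firstDesc l = none) :
    ∀ i, i + 1 < l.length → ¬ (pyget l i > pyget l (i + 1)) := by
  induction l with
  | nil => intro i hi; simp at hi
  | cons a tl ih =>
    cases tl with
    | nil => intro i hi; simp at hi
    | cons b t =>
      rw [firstDesc] at h
      by_cases hab : a > b
      · simp [hab] at h
      · simp [hab] at h
        intro i hi
        cases i with
        | zero => simpa [pyget] using hab
        | succ i' =>
          have := ih h i' (by simpa using hi)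
          simpa [pyget] using this

theorem firstAsc_some (l : List Int) (t : Nat) (h : firstAsc l = some t) :
    t + 1 < l.length ∧ pyget l t < pyget l (t + 1) ∧
      ∀ i, i < t → ¬ (pyget l i < pyget l (i + 1)) := by
  induction l generalizing t with
  | nil => simp [firstAsc] at h
  | cons a tl ih =>
    cases tl with
    | nil => simp [firstAsc] at h
    | cons b t' =>
      rw [firstAsc] at h
      by_cases hab : a < b
      · simp [hab] at h
        subst h
        refine ⟨by simp, ?_, by intro i hi; omega⟩
        simpa [pyget] using hab
      · simp [hab] at h
        obtain ⟨d', hd', rfl⟩ := h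
        obtain ⟨h1, h2, h3⟩ := ih d' hd'
        refine ⟨by simpa using h1, by simpa [pyget] using h2, ?_⟩
        intro i hi
        cases i with
        | zero => simpa [pyget] using hab
        | succ i' =>
          have := h3 i' (by omega)
          simpa [pyget] using this

theorem aLoop1_nil (s : List Int) (arr : List Int) (mis : List Nat) :
    aLoop1 s [] arr mis = .ok arr := rfl

theorem aLoop1_skip0 (s : List Int) (idxs rest : List Nat) (arr : List Int)
    (h : ∀ i ∈ idxs, ¬ (pyget arr i > pyget arr (i + 1))) :
    aLoop1 s (idxs ++ rest) arr [] = aLoop1 s rest arr [] := by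
  induction idxs with
  | nil => rfl
  | cons i idxs ih =>
    have hi := h i (by simp)
    rw [List.cons_append, aLoop1]
    simp only [List.length_nil, if_neg hi]
    norm_num
    exact ih (fun j hj => h j (by simp [hj]))

theorem aLoop1_skip1 (s : List Int) (idxs rest : List Nat) (arr : List Int) (d : Nat)
    (hd : d + 1 < arr.length)
    (hs : pySwap arr d (d + 1) ≠ s)
    (h : ∀ i ∈ idxs, ¬ (pyget arr (i + 1) < pyget arr i)) :
    aLoop1 s (idxs ++ rest) arr [d] = aLoop1 s rest arr [d] := by
  induction idxs with
  | nil => rfl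
  | cons i idxs ih =>
    have hi := h i (by simp)
    rw [List.cons_append, aLoop1]
    simp only [List.length_cons, List.length_nil]
    norm_num
    simp only [if_neg hi]
    norm_num
    rw [if_neg hs]
    rw [pySwap_pySwap arr d (d+1) (by omega) hd]
    exact ih (fun j hj => h j (by simp [hj]))

-- step at the first descent d: misplaced becomes [d], adjacent swap attempted
theorem aLoop1_stepD (s : List Int) (rest : List Nat) (arr : List Int) (d : Nat)
    (hd : d + 1 < arr.length)
    (hdesc : pyget arr d > pyget arr (d + 1)) :
    aLoop1 s (d :: rest) arr [] =
      (if pySwap arr d (d + 1) = s then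
        .error ("yes \nswap " ++ toString (d + 1) ++ " " ++ toString (d + 2))
      else aLoop1 s rest arr [d]) := by
  rw [aLoop1]
  simp only [List.length_nil, if_pos hdesc, List.nil_append]
  norm_num
  split_ifs with h1
  · rfl
  · rw [pySwap_pySwap arr d (d+1) (by omega) hd]

-- step at the second descent e: misplaced becomes [d, e+1], break
theorem aLoop1_stepE (s : List Int) (rest : List Nat) (arr : List Int) (d e : Nat)
    (hd : d < arr.length) (he : e + 1 < arr.length)
    (hdesc : pyget arr (e + 1) < pyget arr e) :
    aLoop1 s (e :: rest) arr [d] =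
      (if pySwap arr d (e + 1) = s then
        .error ("yes \nswap " ++ toString (d + 1) ++ " " ++ toString (e + 1 + 1))
      else .ok arr) := by
  rw [aLoop1]
  norm_num
  rw [if_pos hdesc]
  norm_num
  split_ifs with h1
  · rfl
  · rw [pySwap_pySwap arr d (e+1) hd he]

theorem aLoop1_spec (arr s : List Int) (d : Nat) (h : firstDesc arr = some d) :
    aLoop1 s (List.range (arr.length - 1)) arr [] =
      (if pySwap arr d (d + 1) = s then
        .error ("yes \nswap " ++ toString (d + 1) ++ " " ++ toString (d + 2))
      else
        match firstDesc (arr.drop (d + 1)) with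
        | none => .ok arr
        | some k =>
          if pySwap arr d (d + 2 + k) = s then
            .error ("yes \nswap " ++ toString (d + 1) ++ " " ++ toString (d + 2 + k + 1))
          else .ok arr) := by
  obtain ⟨hd1, hdesc, hmin⟩ := firstDesc_some arr d h
  set n := arr.length with hn
  have hsplit1 : List.range (n - 1) = List.range' 0 d ++ (d :: List.range' (d+1) (n - 2 - d)) := by
    rw [List.range_eq_range', show n - 1 = d + ((n - 2 - d) + 1) by omega,
      ← List.range'_append_1, List.range'_succ]
    norm_num
  rw [hsplit1, aLoop1_skip0 _ _ _ _ (by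
    intro i hi
    exact hmin i (by simpa using (List.mem_range'_1.mp hi).2))]
  rw [aLoop1_stepD _ _ _ _ hd1 hdesc]
  split_ifs with hadj
  · rfl
  · cases hk : firstDesc (arr.drop (d + 1)) with
    | none =>
      have hnod := firstDesc_none _ hk
      have : List.range' (d+1) (n - 2 - d) ++ ([] : List Nat) = List.range' (d+1) (n - 2 - d) := by simp
      rw [← this, aLoop1_skip1 _ _ _ _ _ hd1 hadj (by
        intro i hi
        obtain ⟨h1, h2⟩ := List.mem_range'_1.mp hi
        have := hnod (i - (d+1)) (by simp [List.length_drop]; omega)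
        rw [pyget_drop, pyget_drop] at this
        intro hc
        exact this (by rw [show d + 1 + (i - (d+1)) = i by omega, show d+1+(i-(d+1)+1) = i+1 by omega]; omega)), aLoop1_nil]
    | some k =>
      obtain ⟨hk1, hkdesc, hkmin⟩ := firstDesc_some _ _ hk
      simp only [List.length_drop] at hk1
      rw [pyget_drop, pyget_drop] at hkdesc
      have hsplit2 : List.range' (d+1) (n - 2 - d) =
          List.range' (d+1) k ++ ((d+1+k) :: List.range' (d+1+k+1) (n - 2 - d - k - 1)) := by
        conv_lhs => rw [show n - 2 - d = k + ((n - 2 - d - k - 1) + 1) by omega,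
          ← List.range'_append_1, List.range'_succ]
      rw [hsplit2]
      rw [aLoop1_skip1 _ _ _ _ _ hd1 hadj (by
        intro i hi
        obtain ⟨h1, h2⟩ := List.mem_range'_1.mp hi
        have := hkmin (i - (d+1)) (by omega)
        rw [pyget_drop, pyget_drop] at this
        rw [show d + 1 + (i - (d+1)) = i by omega, show d+1+(i-(d+1)+1) = i+1 by omega] at this
        omega)]
      rw [aLoop1_stepE _ _ _ _ _ (by omega) (by omega) (by
        rw [show d+1+k+1 = d+1+(k+1) by omega]
        omega)]
      have he1 : d + 1 + k + 1 = d + 2 + k := by omega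
      rw [he1]

theorem aLoop2_skip0 (s : List Int) (idxs rest : List Nat) (arr : List Int)
    (h : ∀ i ∈ idxs, ¬ (pyget arr i > pyget arr (i + 1))) :
    aLoop2 s (idxs ++ rest) arr [] = aLoop2 s rest arr [] := by
  induction idxs with
  | nil => rfl
  | cons i idxs ih =>
    rw [List.cons_append, aLoop2]
    norm_num
    rw [if_neg (h i (by simp))]
    exact ih (fun j hj => h j (by simp [hj]))

theorem aLoop2_skip1 (s : List Int) (idxs rest : List Nat) (arr : List Int) (d : Nat)
    (h : ∀ i ∈ idxs, ¬ (pyget arr i < pyget arr (i + 1))) :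
    aLoop2 s (idxs ++ rest) arr [d] = aLoop2 s rest arr [d] := by
  induction idxs with
  | nil => rfl
  | cons i idxs ih =>
    rw [List.cons_append, aLoop2]
    norm_num
    rw [if_neg (h i (by simp))]
    exact ih (fun j hj => h j (by simp [hj]))

theorem aLoop2_stepD (s : List Int) (rest : List Nat) (arr : List Int) (d : Nat)
    (hdesc : pyget arr d > pyget arr (d + 1)) :
    aLoop2 s (d :: rest) arr [] = aLoop2 s rest arr [d] := by
  rw [aLoop2]
  norm_num
  rw [if_pos hdesc]

theorem aLoop2_stepQ (s : List Int) (rest : List Nat) (arr : List Int) (d q : Nat)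
    (hasc : pyget arr q < pyget arr (q + 1)) :
    aLoop2 s (q :: rest) arr [d] = aLoop2 s rest arr [d, q] := by
  rw [aLoop2]
  norm_num
  rw [if_pos hasc]

theorem aLoop2_fin (s : List Int) (j : Nat) (rest : List Nat) (arr : List Int) (d q : Nat) :
    aLoop2 s (j :: rest) arr [d, q] =
      (if pyRevSeg arr d q = s then
        "yes \nreverse " ++ toString (d + 1) ++ " " ++ toString (q + 1)
      else "no") := by
  rw [aLoop2]
  norm_num

theorem aLoop2_spec (arr s : List Int) (d t : Nat)
    (hd : firstDesc arr = some d) (ht : firstAsc (arr.drop (d + 1)) = some t) :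
    aLoop2 s (List.range arr.length) arr [] =
      (if pyRevSeg arr d (d + 1 + t) = s then
        "yes \nreverse " ++ toString (d + 1) ++ " " ++ toString (d + 1 + t + 1)
      else "no") := by
  obtain ⟨hd1, hdesc, hmin⟩ := firstDesc_some arr d hd
  obtain ⟨ht1, hasc, htmin⟩ := firstAsc_some _ _ ht
  simp only [List.length_drop] at ht1
  rw [pyget_drop, pyget_drop] at hasc
  set n := arr.length with hn
  set q := d + 1 + t with hq
  have hsplit : List.range n = List.range' 0 d ++
      (d :: (List.range' (d+1) t ++ (q :: (q+1) :: List.range' (q+2) (n - q - 2)))) := by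
    rw [List.range_eq_range']
    conv_lhs => rw [show n = d + (n - d) by omega, ← List.range'_append_1]
    congr 1
    rw [Nat.zero_add, show n - d = (n - d - 1) + 1 by omega, List.range'_succ]
    congr 1
    conv_lhs => rw [show n - d - 1 = t + (n - d - 1 - t) by omega, ← List.range'_append_1]
    congr 1
    rw [show n - d - 1 - t = ((n - q - 2) + 1) + 1 by omega, List.range'_succ, List.range'_succ,
      show q + 1 + 1 = q + 2 by omega]
  rw [hsplit,
    aLoop2_skip0 _ _ _ _ (by
      intro i hi
      exact hmin i (by simpa using (List.mem_range'_1.mp hi).2)),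
    aLoop2_stepD _ _ _ _ hdesc,
    aLoop2_skip1 _ _ _ _ _ (by
      intro i hi
      obtain ⟨h1, h2⟩ := List.mem_range'_1.mp hi
      have := htmin (i - (d+1)) (by omega)
      rw [pyget_drop, pyget_drop] at this
      rw [show d + 1 + (i - (d+1)) = i by omega, show d+1+(i-(d+1)+1) = i+1 by omega] at this
      exact this),
    aLoop2_stepQ _ _ _ _ _ (by rw [show q + 1 = d+1+(t+1) by omega]; exact hasc),
    aLoop2_fin]

theorem firstAsc_none (l : List Int) (h : firstAsc l = none) :
    ∀ i, i + 1 < l.length → ¬ (pyget l i < pyget l (i + 1)) := by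
  induction l with
  | nil => intro i hi; simp at hi
  | cons a tl ih =>
    cases tl with
    | nil => intro i hi; simp at hi
    | cons b t =>
      rw [firstAsc] at h
      by_cases hab : a < b
      · simp [hab] at h
      · simp [hab] at h
        intro i hi
        cases i with
        | zero => simpa [pyget] using hab
        | succ i' =>
          have := ih h i' (by simpa using hi)
          simpa [pyget] using this

theorem firstDesc_eq_some (l : List Int) (d : Nat)
    (h1 : d + 1 < l.length) (h2 : pyget l d > pyget l (d + 1))
    (h3 : ∀ i, i < d → ¬ (pyget l i > pyget l (i + 1))) :
    firstDesc l = some d := by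
  cases hf : firstDesc l with
  | none => exact absurd h2 (firstDesc_none l hf d h1)
  | some d' =>
    obtain ⟨g1, g2, g3⟩ := firstDesc_some l d' hf
    rcases lt_trichotomy d d' with h | h | h
    · exact absurd h2 (g3 d h)
    · rw [h]
    · exact absurd g2 (h3 d' h)

-- ===== VERDICT (by name: the statement is the Claim_ definition above) =====
theorem almostSorted_spec : Claim_equal_almostSorted := by
  intro arr _hdom hpre
  show almostSorted arr = almostSorted_alt arr
  unfold Pre_almostSorted at hpre
  cases hfd : firstDesc arr with
  | none =>
    have harr : arr = [] := by
      rcases hpre with h | ⟨d, hd, ⟨hds, _⟩, _⟩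
      · exact h
      · simp only [List.mem_range] at hd
        exact absurd hds (firstDesc_none arr hfd d (by omega))
    subst harr
    rfl
  | some d =>
    obtain ⟨hd1, hdesc, hmin⟩ := firstDesc_some arr d hfd
    -- reduce the precondition to facts about the first descent d
    have hP : pySwap arr d (d + 1) = PySem.List.sorted arr (fun x => x) false ∨
        (∃ e, d < e ∧ e + 1 < arr.length ∧ pyget arr e > pyget arr (e + 1) ∧
          (∀ i, d < i → i < e → ¬ (pyget arr i > pyget arr (i + 1))) ∧
          pySwap arr d (e + 1) = PySem.List.sorted arr (fun x => x) false) ∨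
        (∃ q, d < q ∧ q + 1 < arr.length ∧ pyget arr q < pyget arr (q + 1)) := by
      rcases hpre with h | ⟨d0, hd0, ⟨hds, hmn⟩, hrest⟩
      · subst h; simp [firstDesc] at hfd
      · simp only [List.mem_range] at hd0
        have hsame : firstDesc arr = some d0 :=
          firstDesc_eq_some arr d0 (by omega) hds
            (fun i hi => (hmn i (List.mem_range.mpr hi)))
        rw [hfd] at hsame
        obtain rfl : d0 = d := by injection hsame with h'; omega
        rcases hrest with h | ⟨e, he1, he2, he3, he4, he5⟩ | ⟨q, hq1, hq2, hq3⟩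
        · exact Or.inl h
        · exact Or.inr (Or.inl ⟨e, he2, by simp only [List.mem_range] at he1; omega, he3,
            (fun i hi1 hi2 => he4 i (List.mem_range.mpr hi2) hi1), he5⟩)
        · exact Or.inr (Or.inr ⟨q, hq2, by simp only [List.mem_range] at hq1; omega, hq3⟩)
    simp only [almostSorted, almostSorted_alt, hfd]
    rw [aLoop1_spec arr _ d hfd]
    by_cases hadj : pySwap arr d (d + 1) = PySem.List.sorted arr (fun x => x) false
    · rw [if_pos hadj, if_pos hadj]
    · rw [if_neg hadj, if_neg hadj]
      -- a strict ascent after d exists in every remaining case of the precondition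
      have hasc : ∀ (hno : ∀ k, firstDesc (arr.drop (d + 1)) = some k →
            pySwap arr d (d + 2 + k) ≠ PySem.List.sorted arr (fun x => x) false),
          ∃ t, firstAsc (arr.drop (d + 1)) = some t := by
        intro hno
        have hqex : ∃ q, d < q ∧ q + 1 < arr.length ∧ pyget arr q < pyget arr (q + 1) := by
          rcases hP with h | ⟨e, he1, he2, he3, he4, he5⟩ | h
          · exact absurd h hadj
          · -- e is the first descent after d, so firstDesc on the dropped list finds it
            have : firstDesc (arr.drop (d + 1)) = some (e - (d + 1)) := by
              apply firstDesc_eq_some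
              · simp only [List.length_drop]; omega
              · rw [pyget_drop, pyget_drop, show d + 1 + (e - (d + 1)) = e by omega,
                  show d + 1 + (e - (d + 1) + 1) = e + 1 by omega]
                exact he3
              · intro i hi
                rw [pyget_drop, pyget_drop]
                exact he4 (d + 1 + i) (by omega) (by omega)
            have := hno _ this
            rw [show d + 2 + (e - (d + 1)) = e + 1 by omega] at this
            exact absurd he5 this
          · exact h
        obtain ⟨q, hq1, hq2, hq3⟩ := hqex
        cases hfa : firstAsc (arr.drop (d + 1)) with
        | some t => exact ⟨t, rfl⟩
        | none =>
          have := firstAsc_none _ hfa (q - (d + 1)) (by simp only [List.length_drop]; omega)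
          rw [pyget_drop, pyget_drop, show d + 1 + (q - (d + 1)) = q by omega,
            show d + 1 + (q - (d + 1) + 1) = q + 1 by omega] at this
          exact absurd hq3 this
      cases hk : firstDesc (arr.drop (d + 1)) with
      | some k =>
        by_cases he : pySwap arr d (d + 2 + k) = PySem.List.sorted arr (fun x => x) false
        · simp only [if_pos he]
        · simp only [if_neg he]
          obtain ⟨t, hta⟩ := hasc (by intro k' hk' ; rw [hk] at hk'; injection hk' with h'; subst h'; exact he)
          rw [aLoop2_spec arr _ d t hfd hta, hta]
      | none =>
        obtain ⟨t, hta⟩ := hasc (by intro k' hk'; rw [hk] at hk'; exact absurd hk' (by simp))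
        dsimp only
        rw [aLoop2_spec arr _ d t hfd hta, hta]
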